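-- pv_equiv track=rewrite | github.com/mrzrx/AI-mahjong | mahjong_play_two.py | isgang
-- ===== SOURCE A (Python) =====
-- def isgang(listt,listm,selectonecard):
--     minggang=angang=0
--     a=0
--     if len(listt)>=4:
--         for i in range(len(listt)-3):
--             if a>len(listt)-4:
--                 break
--             elif listt[a]==listt[a+1] and listt[a+1]==listt[a+2] and listt[a+2]==listt[a+3]:
--                 angang=1
--                 break
--             else:
--                 a+=1
--     num=0
--     if len(listm)>=3:
--         for i in listm:
--             if selectonecard==i:
--                 num+=1
--     if num==3:
--         minggang=1
--     return [minggang,angang]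
-- ===== SOURCE B (Python) =====
-- def isgang(listt, listm, selectonecard):
--     # Single run-length scan instead of a 4-wide sliding-window index loop.
--     angang = 0
--     run = 0
--     prev = None
--     for x in listt:
--         run = run + 1 if prev == x else 1
--         prev = x
--         if run >= 4:
--             angang = 1
--     minggang = 1 if listm.count(selectonecard) == 3 else 0
--     return [minggang, angang]
-- ===== Notes on version B (the rewrite author's own statement) =====
-- stated objective: simpler
-- what changed: Replace A's index-based 4-wide sliding-window scan with break bookkeeping by a single run-length counter pass, and replace the guarded counting loop by list.count (the len>=3 guard is redundant since a count of 3 needs 3 elements).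
import Mathlib
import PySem

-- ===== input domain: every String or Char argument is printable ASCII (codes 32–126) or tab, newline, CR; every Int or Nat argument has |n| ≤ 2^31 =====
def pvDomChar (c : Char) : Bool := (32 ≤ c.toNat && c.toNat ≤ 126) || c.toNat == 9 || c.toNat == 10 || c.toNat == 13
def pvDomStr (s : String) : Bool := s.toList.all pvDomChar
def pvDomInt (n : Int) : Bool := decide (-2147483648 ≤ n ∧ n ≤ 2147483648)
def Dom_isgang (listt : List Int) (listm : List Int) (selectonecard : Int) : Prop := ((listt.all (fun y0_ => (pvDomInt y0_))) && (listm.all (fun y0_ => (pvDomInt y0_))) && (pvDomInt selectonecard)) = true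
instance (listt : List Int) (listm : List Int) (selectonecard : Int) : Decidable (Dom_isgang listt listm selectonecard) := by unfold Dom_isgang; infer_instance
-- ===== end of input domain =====

-- B replaces A's index-based 4-window scan by a single run-length counter pass (simpler).

-- ===== PORT A =====
-- the `for i in range(len(listt)-3)` loop: fuel = number of remaining iterations, a = A's index
def isgangLoopA (listt : List Int) : Nat → Nat → Int
  | 0, _ => 0
  | fuel + 1, a =>
    if (a : Int) > (listt.length : Int) - 4 then 0
    else if listt.getD a 0 = listt.getD (a + 1) 0 ∧ listt.getD (a + 1) 0 = listt.getD (a + 2) 0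
            ∧ listt.getD (a + 2) 0 = listt.getD (a + 3) 0 then 1
    else isgangLoopA listt fuel (a + 1)

def isgang (listt : List Int) (listm : List Int) (selectonecard : Int) : List Int :=
  let angang : Int := if listt.length ≥ 4 then isgangLoopA listt (listt.length - 3) 0 else 0
  let num : Int :=
    if listm.length ≥ 3 then
      listm.foldl (fun num i => if selectonecard = i then num + 1 else num) 0
    else 0
  let minggang : Int := if num = 3 then 1 else 0
  [minggang, angang]

-- ===== PORT B =====
-- one step of B's run-length loop; state = (angang, run, prev)
def altStep (st : Int × Int × Option Int) (x : Int) : Int × Int × Option Int :=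
  let run : Int := if st.2.2 = some x then st.2.1 + 1 else 1
  let angang : Int := if run ≥ 4 then 1 else st.1
  (angang, run, some x)

def isgang_alt (listt : List Int) (listm : List Int) (selectonecard : Int) : List Int :=
  let st := listt.foldl altStep (0, 0, none)
  let minggang : Int := if PySem.List.count listm selectonecard = 3 then 1 else 0
  [minggang, st.1]

-- ===== PRECONDITION & SPEC =====
def Spec_isgang (listt : List Int) (listm : List Int) (selectonecard : Int) (out : List Int) : Prop := out = isgang_alt listt listm selectonecard
instance (listt : List Int) (listm : List Int) (selectonecard : Int) (out : List Int) : Decidable (Spec_isgang listt listm selectonecard out) := by unfold Spec_isgang; infer_instance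

-- ===== CLAIM (what is proved, stated in full; the proofs are below) =====
def Claim_equal_isgang : Prop := ∀ (listt : List Int) (listm : List Int) (selectonecard : Int), Dom_isgang listt listm selectonecard → Spec_isgang listt listm selectonecard (isgang listt listm selectonecard)

-- ===== LEMMAS AND PROOFS =====

-- bridge predicate: does the list contain four consecutive equal elements?
def has4 : List Int → Bool
  | a :: b :: c :: d :: t => (decide (a = b) && decide (b = c) && decide (c = d)) || has4 (b :: c :: d :: t)
  | _ => false

theorem has4_short (xs : List Int) (h : xs.length < 4) : has4 xs = false := by
  match xs with
  | [] => rfl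
  | [_] => rfl
  | [_, _] => rfl
  | [_, _, _] => rfl
  | _ :: _ :: _ :: _ :: _ => simp at h; omega

theorem has4_drop1 (p x : Int) (t : List Int) (h : x ≠ p) :
    has4 (p :: x :: t) = has4 (x :: t) := by
  match t with
  | [] => rfl
  | [_] => simp [has4]
  | y :: z :: t' =>
    simp only [has4]
    have : decide (p = x) = false := by simp [Ne.symm h]
    simp [this]

theorem has4_drop2 (p x : Int) (t : List Int) (h : x ≠ p) :
    has4 (p :: p :: x :: t) = has4 (x :: t) := by
  match t with
  | [] => rfl
  | y :: t' =>
    simp only [has4]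
    have hx : decide (p = x) = false := by simp [Ne.symm h]
    simp only [hx, Bool.and_false, Bool.false_and, Bool.false_or]
    exact has4_drop1 p x (y :: t') h

theorem has4_drop3 (p x : Int) (t : List Int) (h : x ≠ p) :
    has4 (p :: p :: p :: x :: t) = has4 (x :: t) := by
  simp only [has4]
  have hx : decide (p = x) = false := by simp [Ne.symm h]
  simp only [hx, Bool.and_false, Bool.false_or]
  exact has4_drop2 p x t h

-- run-length recursion matching B's loop, started with current value p and run count r
def has4run (p r : Int) : List Int → Bool
  | [] => false
  | x :: t => if x = p then (decide (r + 1 ≥ 4)) || has4run p (r + 1) t else has4run x 1 t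

theorem has4run_eq_has4 (xs : List Int) : ∀ p : Int,
    has4run p 1 xs = has4 (p :: xs) ∧ has4run p 2 xs = has4 (p :: p :: xs)
      ∧ has4run p 3 xs = has4 (p :: p :: p :: xs) := by
  induction xs with
  | nil => intro p; exact ⟨rfl, rfl, rfl⟩
  | cons x t ih =>
    intro p
    by_cases hxp : x = p
    · subst hxp
      refine ⟨?_, ?_, ?_⟩
      · show has4run x 1 (x :: t) = has4 (x :: x :: t)
        simp only [has4run]
        norm_num
        exact (ih x).2.1
      · show has4run x 2 (x :: t) = has4 (x :: x :: x :: t)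
        simp only [has4run]
        norm_num
        exact (ih x).2.2
      · show has4run x 3 (x :: t) = has4 (x :: x :: x :: x :: t)
        simp only [has4run, has4]
        norm_num
    · have h1 : has4run x 1 t = has4 (x :: t) := (ih x).1
      refine ⟨?_, ?_, ?_⟩
      · simp only [has4run, if_neg hxp, h1, has4_drop1 p x t hxp]
      · simp only [has4run, if_neg hxp, h1, has4_drop2 p x t hxp]
      · simp only [has4run, if_neg hxp, h1, has4_drop3 p x t hxp]

-- B's loop computes has4run (once the first element has fixed prev)
theorem foldl_altStep (xs : List Int) : ∀ (g r p : Int),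
    (xs.foldl altStep (g, r, some p)).1 = if has4run p r xs then 1 else g := by
  induction xs with
  | nil => intro g r p; simp [has4run]
  | cons x t ih =>
    intro g r p
    by_cases hxp : x = p
    · subst hxp
      have hst : altStep (g, r, some x) x = (if (r + 1 : Int) ≥ 4 then 1 else g, r + 1, some x) := by
        simp [altStep]
      rw [List.foldl_cons, hst, ih]
      have hrun : has4run x r (x :: t) = ((decide ((r:Int) + 1 ≥ 4)) || has4run x (r + 1) t) := by
        simp [has4run]
      rw [hrun]
      by_cases h4 : (r : Int) + 1 ≥ 4
      · simp only [h4, decide_true, Bool.true_or, if_pos trivial]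
        split <;> rfl
      · simp only [if_neg h4]
        have : decide ((r : Int) + 1 ≥ 4) = false := by simpa using h4
        rw [this, Bool.false_or]
    · have hst : altStep (g, r, some p) x = (g, 1, some x) := by
        have : ¬ (some p = some x) := by simp [Ne.symm hxp]
        have h14 : ¬ ((1 : Int) ≥ 4) := by omega
        simp [altStep, this, h14]
      rw [List.foldl_cons, hst, ih]
      simp [has4run, hxp]

theorem altB_eq_has4 (xs : List Int) :
    (xs.foldl altStep ((0 : Int), (0 : Int), (none : Option Int))).1
      = if has4 xs then 1 else 0 := by
  match xs with
  | [] => rfl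
  | x :: t =>
    have hst : altStep ((0 : Int), (0 : Int), (none : Option Int)) x = (0, 1, some x) := by
      have h14 : ¬ ((1 : Int) ≥ 4) := by omega
      simp [altStep, h14]
    rw [List.foldl_cons, hst, foldl_altStep, (has4run_eq_has4 t x).1]

-- A's loop computes has4 of the rest of the list
theorem isgangLoopA_eq (listt : List Int) (fuel : Nat) : ∀ a : Nat,
    a + 3 + fuel = listt.length →
    isgangLoopA listt fuel a = if has4 (listt.drop a) then 1 else 0 := by
  induction fuel with
  | zero =>
    intro a h
    have hlen : (listt.drop a).length < 4 := by simp; omega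
    simp [isgangLoopA, has4_short _ hlen]
  | succ n ih =>
    intro a h
    have hguard : ¬ ((a : Int) > (listt.length : Int) - 4) := by
      omega
    have ha0 : a < listt.length := by omega
    have ha1 : a + 1 < listt.length := by omega
    have ha2 : a + 2 < listt.length := by omega
    have ha3 : a + 3 < listt.length := by omega
    have hdrop : listt.drop a
        = listt[a] :: listt[a+1] :: listt[a+2] :: listt[a+3] :: listt.drop (a+4) := by
      rw [List.drop_eq_getElem_cons ha0, List.drop_eq_getElem_cons ha1,
          List.drop_eq_getElem_cons ha2, List.drop_eq_getElem_cons ha3]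
    have g0 : listt.getD a 0 = listt[a] := List.getD_eq_getElem _ _ ha0
    have g1 : listt.getD (a+1) 0 = listt[a+1] := List.getD_eq_getElem _ _ ha1
    have g2 : listt.getD (a+2) 0 = listt[a+2] := List.getD_eq_getElem _ _ ha2
    have g3 : listt.getD (a+3) 0 = listt[a+3] := List.getD_eq_getElem _ _ ha3
    simp only [isgangLoopA, if_neg hguard, g0, g1, g2, g3]
    by_cases hq : listt[a] = listt[a+1] ∧ listt[a+1] = listt[a+2] ∧ listt[a+2] = listt[a+3]
    · rw [if_pos hq, hdrop]
      simp only [has4]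
      simp [hq.1, hq.2.1, hq.2.2]
    · rw [if_neg hq, ih (a+1) (by omega), hdrop]
      have hd1 : listt.drop (a+1)
          = listt[a+1] :: listt[a+2] :: listt[a+3] :: listt.drop (a+4) := by
        rw [List.drop_eq_getElem_cons ha1, List.drop_eq_getElem_cons ha2,
            List.drop_eq_getElem_cons ha3]
      rw [hd1]
      simp only [has4]
      have hfalse : (decide (listt[a] = listt[a+1]) && decide (listt[a+1] = listt[a+2])
          && decide (listt[a+2] = listt[a+3])) = false := by
        by_contra hc
        simp only [Bool.not_eq_false, Bool.and_eq_true, decide_eq_true_eq] at hc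
        exact hq ⟨hc.1.1, hc.1.2, hc.2⟩
      simp only [hfalse, Bool.false_or]

theorem angangA_eq_has4 (listt : List Int) :
    (if listt.length ≥ 4 then isgangLoopA listt (listt.length - 3) 0 else 0)
      = if has4 listt then 1 else 0 := by
  by_cases h4 : listt.length ≥ 4
  · rw [if_pos h4, isgangLoopA_eq listt (listt.length - 3) 0 (by omega)]
    simp
  · rw [if_neg h4, has4_short listt (by omega), if_neg (by simp)]

-- A's counting loop is the (Int-cast) count
theorem foldl_countA (listm : List Int) (c : Int) :
    listm.foldl (fun num i => if c = i then num + 1 else num) 0 = (listm.count c : Int) := by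
  rw [PySem.List.foldl_ite_add_one (p := fun i => c = i)]
  have : listm.countP (fun i => decide (c = i)) = listm.count c := by
    unfold List.count
    apply List.countP_congr
    intro a _
    by_cases h : c = a
    · simp [h]
    · simp [h, Ne.symm h]
  rw [this]
  ring

-- ===== VERDICT (by name: the statement is the Claim_ definition above) =====
theorem isgang_spec : Claim_equal_isgang := by
  intro listt listm selectonecard _
  unfold Spec_isgang isgang isgang_alt
  simp only [angangA_eq_has4, altB_eq_has4, foldl_countA, PySem.List.count_eq]
  have hle : listm.count selectonecard ≤ listm.length := List.count_le_length
  by_cases h3 : listm.length ≥ 3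
  · rw [if_pos h3]
    have : ((listm.count selectonecard : Int) = 3) ↔ (listm.count selectonecard = 3) := by
      omega
    rw [if_congr this rfl rfl]
    rfl
  · rw [if_neg h3]
    have h1 : ¬ ((0 : Int) = 3) := by omega
    have h2 : ¬ (listm.count selectonecard = 3) := by omega
    rw [if_neg h1, if_neg h2]
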